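-- pv_equiv track=rewrite | github.com/nuuoe/SMT-ILP | ip/generate_ip.py | generate_ip1_active
-- ===== SOURCE A (Python) =====
-- def generate_ip1_active(objects, propagates_map, num_pos=20, num_neg=20):
--     """
--     Pattern: ip1_active(A) if propagates(A,B) for some B
--
--     Tests: Basic Z3 reasoning (influence calculation)
--     PI: Not required (single hop)
--     """
--     pos_examples, neg_examples = [], []
--
--     # Positives: Objects that propagate to at least one other object
--     for obj in objects:
--         if propagates_map[obj['id']] and len(pos_examples) < num_pos:
--             pos_examples.append(f"ip1_active({obj['id']})")
--
--     # Negatives: Objects that don't propagate to any other object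
--     for obj in objects:
--         if not propagates_map[obj['id']] and len(neg_examples) < num_neg:
--             neg_examples.append(f"ip1_active({obj['id']})")
--
--     return pos_examples[:num_pos], neg_examples[:num_neg]
-- ===== SOURCE B (Python) =====
-- def generate_ip1_active(objects, propagates_map, num_pos=20, num_neg=20):
--     # Single fused pass with early exit; lists never exceed their caps, so no final slicing.
--     pos_examples, neg_examples = [], []
--     for obj in objects:
--         if len(pos_examples) >= num_pos and len(neg_examples) >= num_neg:
--             break
--         if propagates_map[obj['id']]:
--             if len(pos_examples) < num_pos:
--                 pos_examples.append(f"ip1_active({obj['id']})")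
--         elif len(neg_examples) < num_neg:
--             neg_examples.append(f"ip1_active({obj['id']})")
--     return pos_examples, neg_examples
-- ===== Notes on version B (the rewrite author's own statement) =====
-- stated objective: simpler
-- what changed: Replaces A's two full passes over objects plus final slicing with one fused loop that fills both lists simultaneously, stops early once both quotas are met, and returns the lists directly (they can never exceed their caps).
import Mathlib
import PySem

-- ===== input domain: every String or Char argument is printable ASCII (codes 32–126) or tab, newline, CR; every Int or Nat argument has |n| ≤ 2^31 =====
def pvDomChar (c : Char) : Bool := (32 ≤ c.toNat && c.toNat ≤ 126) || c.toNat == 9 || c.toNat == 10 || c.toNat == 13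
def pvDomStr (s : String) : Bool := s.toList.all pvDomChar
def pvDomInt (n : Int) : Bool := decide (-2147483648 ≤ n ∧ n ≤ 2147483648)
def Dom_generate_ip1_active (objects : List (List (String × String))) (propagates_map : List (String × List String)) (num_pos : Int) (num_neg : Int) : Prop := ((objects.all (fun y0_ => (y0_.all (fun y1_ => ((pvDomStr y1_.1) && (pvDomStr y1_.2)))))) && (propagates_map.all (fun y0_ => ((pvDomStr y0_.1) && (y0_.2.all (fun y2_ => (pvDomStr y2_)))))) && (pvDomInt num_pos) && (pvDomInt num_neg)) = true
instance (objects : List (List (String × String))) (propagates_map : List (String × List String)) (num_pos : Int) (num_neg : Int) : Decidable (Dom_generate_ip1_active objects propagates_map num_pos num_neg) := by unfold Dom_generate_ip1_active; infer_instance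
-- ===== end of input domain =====

-- ===== PORT A =====
-- B fuses A's two passes into one loop with an early break and drops the final slices; objective: simpler.
-- shared helper: the f-string "ip1_active({id})"
def pvFmt (i : String) : String := "ip1_active(" ++ i ++ ")"

-- shared helper: obj['id'] then propagates_map[that id]; none = a lookup Python would raise on (excluded by Pre_)
def pvLook (propagates_map : List (String × List String)) (o : List (String × String)) : Option (String × List String) :=
  ((PySem.Dict.mk o).get? "id").bind fun i => ((PySem.Dict.mk propagates_map).get? i).map fun l => (i, l)

-- one step of A's positives loop: append iff value truthy and len(pos_examples) < num_pos
def pvPosStep (num_pos : Int) (propagates_map : List (String × List String))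
    (acc : List String) (o : List (String × String)) : List String :=
  match pvLook propagates_map o with
  | some (i, l) => if !l.isEmpty && decide ((acc.length : Int) < num_pos) then acc ++ [pvFmt i] else acc
  | none => acc

-- one step of A's negatives loop: append iff value falsy and len(neg_examples) < num_neg
def pvNegStep (num_neg : Int) (propagates_map : List (String × List String))
    (acc : List String) (o : List (String × String)) : List String :=
  match pvLook propagates_map o with
  | some (i, l) => if l.isEmpty && decide ((acc.length : Int) < num_neg) then acc ++ [pvFmt i] else acc
  | none => acc

def generate_ip1_active (objects : List (List (String × String))) (propagates_map : List (String × List String)) (num_pos : Int) (num_neg : Int) : List String × List String :=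
  let pos_examples := objects.foldl (pvPosStep num_pos propagates_map) []
  let neg_examples := objects.foldl (pvNegStep num_neg propagates_map) []
  (PySem.List.slice pos_examples none (some num_pos), PySem.List.slice neg_examples none (some num_neg))

-- ===== PORT B =====
-- B's single loop: break when both quotas are met, else classify the object once
def pvAltLoop (propagates_map : List (String × List String)) (num_pos num_neg : Int) :
    List (List (String × String)) → List String → List String → List String × List String
  | [], pos, neg => (pos, neg)
  | o :: rest, pos, neg =>
    if decide (num_pos ≤ (pos.length : Int)) && decide (num_neg ≤ (neg.length : Int)) then (pos, neg)
    else
      match pvLook propagates_map o with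
      | some (i, l) =>
        if !l.isEmpty then
          if decide ((pos.length : Int) < num_pos) then pvAltLoop propagates_map num_pos num_neg rest (pos ++ [pvFmt i]) neg
          else pvAltLoop propagates_map num_pos num_neg rest pos neg
        else
          if decide ((neg.length : Int) < num_neg) then pvAltLoop propagates_map num_pos num_neg rest pos (neg ++ [pvFmt i])
          else pvAltLoop propagates_map num_pos num_neg rest pos neg
      | none => pvAltLoop propagates_map num_pos num_neg rest pos neg

def generate_ip1_active_alt (objects : List (List (String × String))) (propagates_map : List (String × List String)) (num_pos : Int) (num_neg : Int) : List String × List String :=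
  pvAltLoop propagates_map num_pos num_neg objects [] []

-- ===== PRECONDITION & SPEC =====
-- Pre_ excludes exactly the inputs on which A raises KeyError: some object lacks an 'id' key
-- or its id is not a key of propagates_map.
def Pre_generate_ip1_active (objects : List (List (String × String))) (propagates_map : List (String × List String)) (num_pos : Int) (num_neg : Int) : Prop :=
  objects.all (fun o =>
    match (PySem.Dict.mk o).get? "id" with
    | some i => ((PySem.Dict.mk propagates_map).get? i).isSome
    | none => false) = true
instance (objects : List (List (String × String))) (propagates_map : List (String × List String)) (num_pos : Int) (num_neg : Int) : Decidable (Pre_generate_ip1_active objects propagates_map num_pos num_neg) := by unfold Pre_generate_ip1_active; infer_instance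

def pvWitness_generate_ip1_active : (List (List (String × String))) × (List (String × List String)) × Int × Int :=
  ([[("id", "a")], [("id", "b")]], [("a", ["b"]), ("b", [])], 20, 20)

def Spec_generate_ip1_active (objects : List (List (String × String))) (propagates_map : List (String × List String)) (num_pos : Int) (num_neg : Int) (out : List String × List String) : Prop := out = generate_ip1_active_alt objects propagates_map num_pos num_neg
instance (objects : List (List (String × String))) (propagates_map : List (String × List String)) (num_pos : Int) (num_neg : Int) (out : List String × List String) : Decidable (Spec_generate_ip1_active objects propagates_map num_pos num_neg out) := by unfold Spec_generate_ip1_active; infer_instance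

-- ===== CLAIM (what is proved, stated in full; the proofs are below) =====
def Claim_equal_generate_ip1_active : Prop := ∀ (objects : List (List (String × String))) (propagates_map : List (String × List String)) (num_pos : Int) (num_neg : Int), Dom_generate_ip1_active objects propagates_map num_pos num_neg → Pre_generate_ip1_active objects propagates_map num_pos num_neg → Spec_generate_ip1_active objects propagates_map num_pos num_neg (generate_ip1_active objects propagates_map num_pos num_neg)

-- ===== LEMMAS AND PROOFS =====

-- A's positive loop is a no-op once the quota is reached
theorem pvPosFold_full (pm : List (String × List String)) (np : Int) :
    ∀ (l : List (List (String × String))) (acc : List String), np ≤ (acc.length : Int) →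
      l.foldl (pvPosStep np pm) acc = acc := by
  intro l
  induction l with
  | nil => intro acc _; rfl
  | cons o rest ih =>
    intro acc h
    have hstep : pvPosStep np pm acc o = acc := by
      unfold pvPosStep
      cases pvLook pm o with
      | none => rfl
      | some p =>
        simp only
        have : decide ((acc.length : Int) < np) = false := by simp; omega
        simp [this]
    simp [List.foldl, hstep, ih acc h]

theorem pvNegFold_full (pm : List (String × List String)) (nn : Int) :
    ∀ (l : List (List (String × String))) (acc : List String), nn ≤ (acc.length : Int) →
      l.foldl (pvNegStep nn pm) acc = acc := by
  intro l
  induction l with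
  | nil => intro acc _; rfl
  | cons o rest ih =>
    intro acc h
    have hstep : pvNegStep nn pm acc o = acc := by
      unfold pvNegStep
      cases pvLook pm o with
      | none => rfl
      | some p =>
        simp only
        have : decide ((acc.length : Int) < nn) = false := by simp; omega
        simp [this]
    simp [List.foldl, hstep, ih acc h]

-- B's fused loop computes exactly the pair of A's two folds
theorem pvAltLoop_eq (pm : List (String × List String)) (np nn : Int) :
    ∀ (l : List (List (String × String))) (pos neg : List String),
      pvAltLoop pm np nn l pos neg =
        (l.foldl (pvPosStep np pm) pos, l.foldl (pvNegStep nn pm) neg) := by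
  intro l
  induction l with
  | nil => intro pos neg; rfl
  | cons o rest ih =>
    intro pos neg
    by_cases hfull : np ≤ (pos.length : Int) ∧ nn ≤ (neg.length : Int)
    · have hb : (decide (np ≤ (pos.length : Int)) && decide (nn ≤ (neg.length : Int))) = true := by
        simp [hfull.1, hfull.2]
      simp only [pvAltLoop, hb, if_true]
      rw [pvPosFold_full pm np (o :: rest) pos hfull.1,
          pvNegFold_full pm nn (o :: rest) neg hfull.2]
    · have hb : (decide (np ≤ (pos.length : Int)) && decide (nn ≤ (neg.length : Int))) = false := by
        rcases not_and_or.mp hfull with h | h <;> simp [h]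
      simp only [pvAltLoop, hb, Bool.false_eq_true, if_false]
      cases hlk : pvLook pm o with
      | none =>
        simp [List.foldl, pvPosStep, pvNegStep, hlk, ih]
      | some p =>
        obtain ⟨i, v⟩ := p
        by_cases hv : v.isEmpty = true
        · by_cases hn : (neg.length : Int) < nn
          · simp [List.foldl, pvPosStep, pvNegStep, hlk, hv, hn, ih]
          · simp [List.foldl, pvPosStep, pvNegStep, hlk, hv, hn, ih]
        · by_cases hp : (pos.length : Int) < np
          · simp [List.foldl, pvPosStep, pvNegStep, hlk, hv, hp, ih]
          · simp [List.foldl, pvPosStep, pvNegStep, hlk, hv, hp, ih]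

-- A's loop never grows past its quota
theorem pvPosFold_len (pm : List (String × List String)) (np : Int) :
    ∀ (l : List (List (String × String))) (acc : List String), acc.length ≤ np.toNat →
      (l.foldl (pvPosStep np pm) acc).length ≤ np.toNat := by
  intro l
  induction l with
  | nil => intro acc h; exact h
  | cons o rest ih =>
    intro acc h
    apply ih
    unfold pvPosStep
    cases pvLook pm o with
    | none => exact h
    | some p =>
      simp only
      by_cases hc : (!p.2.isEmpty && decide ((acc.length : Int) < np)) = true
      · have := of_decide_eq_true (Bool.and_elim_right hc)
        simp [hc]; omega
      · simp [hc]; omega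

theorem pvNegFold_len (pm : List (String × List String)) (nn : Int) :
    ∀ (l : List (List (String × String))) (acc : List String), acc.length ≤ nn.toNat →
      (l.foldl (pvNegStep nn pm) acc).length ≤ nn.toNat := by
  intro l
  induction l with
  | nil => intro acc h; exact h
  | cons o rest ih =>
    intro acc h
    apply ih
    unfold pvNegStep
    cases pvLook pm o with
    | none => exact h
    | some p =>
      simp only
      by_cases hc : (p.2.isEmpty && decide ((acc.length : Int) < nn)) = true
      · have := of_decide_eq_true (Bool.and_elim_right hc)
        simp [hc]; omega
      · simp [hc]; omega

-- xs[:b] is the identity on a list of length ≤ max b 0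
theorem pvSlice_id (xs : List String) (b : Int) (h : xs.length ≤ b.toNat) :
    PySem.List.slice xs none (some b) = xs := by
  by_cases hb : 0 ≤ b
  · have hbe : b = ((b.toNat : Nat) : Int) := by omega
    rw [hbe, PySem.List.slice_to_natCast]
    exact List.take_of_length_le h
  · have hxs : xs = [] := by
      have : xs.length = 0 := by omega
      exact List.eq_nil_of_length_eq_zero this
    subst hxs
    simp [PySem.List.slice]

-- ===== VERDICT (by name: the statement is the Claim_ definition above) =====
theorem generate_ip1_active_spec : Claim_equal_generate_ip1_active := by
  intro objects pm np nn _dom _pre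
  unfold Spec_generate_ip1_active generate_ip1_active generate_ip1_active_alt
  rw [pvAltLoop_eq]
  simp only
  rw [pvSlice_id _ np (pvPosFold_len pm np objects [] (by simp)),
      pvSlice_id _ nn (pvNegFold_len pm nn objects [] (by simp))]
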